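-- pv_equiv track=rewrite | github.com/albarami/Sanad_Trader | scripts/stablecoin_filter.py | is_stablecoin
-- ===== SOURCE A (Python) =====
-- STABLECOIN_ADDRESSES = {
--     "Es9vMFrzaCERmJfrF4H2FYD4KCoNkY11McCe8BenwNYB",  # USDT (Tether)
--     "EPjFWdd5AufqSSqeM2qN1xzybapC8G4wEGGkZwyTDt1v",  # USDC (Circle)
--     "EjmyN6qEC1Tf1JxiG1ae7UTJhUxSwk1TCWNWqxWV4J6o",  # DAI
--     "AJ1W9A9N9dEMdVyoDiam2rV44gnBm2csrPDP7xqcapgX",  # BUSD (Binance USD, deprecated)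
--     "7kbnvuGBxxj8AG9qp8Scn56muWGaRaFqxg1FsRp3PaFT",  # UXD
--     "BXXkv6z8ykpG1yuvUDPgh732wzVHB69RnB9YgSYh3itW",  # USDC (Wormhole)
--     "Ea5SjE2Y6yvCeW5dYTn7PYMuW5ikXkvbGdcmSnXeaLjS",  # PAX Gold (technically not stablecoin, but not tradeable)
-- }
--
-- STABLECOIN_SYMBOLS = {
--     "USDT", "USDC", "DAI", "BUSD", "USDD", "TUSD", "FRAX",
--     "USDP", "GUSD", "PAX", "UST", "LUSD", "SUSD", "CUSD",
--     "UXD", "USDB", "DOLA", "USDR", "USDX", "USDS", "USD1",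
--     "USDJ", "USDK", "USDQ", "MIM", "FEI", "USDH", "CASH"
-- }
--
-- def is_stablecoin(token: str = None, symbol: str = None, address: str = None) -> bool:
--     """
--     Check if token is a stablecoin by address or symbol.
--     Returns True if stablecoin detected.
--
--     Args:
--         token: Token symbol (legacy field)
--         symbol: Token symbol (preferred field)
--         address: Token contract address (most reliable)
--     """
--     # Address check (most reliable)
--     if address and address in STABLECOIN_ADDRESSES:
--         return True
--
--     # Symbol check (fallback)
--     check_symbol = symbol or token
--     if check_symbol:
--         check_upper = check_symbol.upper().strip()
--         # Exact match
--         if check_upper in STABLECOIN_SYMBOLS: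
--             return True
--         # Starts with stablecoin name (catches USDT-8, USDC.e, etc.)
--         if any(check_upper.startswith(sc) for sc in STABLECOIN_SYMBOLS):
--             return True
--
--     return False
-- ===== SOURCE B (Python) =====
-- STABLECOIN_ADDRESSES = {
--     "Es9vMFrzaCERmJfrF4H2FYD4KCoNkY11McCe8BenwNYB",
--     "EPjFWdd5AufqSSqeM2qN1xzybapC8G4wEGGkZwyTDt1v",
--     "EjmyN6qEC1Tf1JxiG1ae7UTJhUxSwk1TCWNWqxWV4J6o",
--     "AJ1W9A9N9dEMdVyoDiam2rV44gnBm2csrPDP7xqcapgX",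
--     "7kbnvuGBxxj8AG9qp8Scn56muWGaRaFqxg1FsRp3PaFT",
--     "BXXkv6z8ykpG1yuvUDPgh732wzVHB69RnB9YgSYh3itW",
--     "Ea5SjE2Y6yvCeW5dYTn7PYMuW5ikXkvbGdcmSnXeaLjS",
-- }
--
-- STABLECOIN_SYMBOLS = {
--     "USDT", "USDC", "DAI", "BUSD", "USDD", "TUSD", "FRAX",
--     "USDP", "GUSD", "PAX", "UST", "LUSD", "SUSD", "CUSD",
--     "UXD", "USDB", "DOLA", "USDR", "USDX", "USDS", "USD1",
--     "USDJ", "USDK", "USDQ", "MIM", "FEI", "USDH", "CASH"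
-- }
--
--
-- def is_stablecoin(token: str = None, symbol: str = None, address: str = None) -> bool:
--     # the empty string is not a stablecoin address, so no truthiness guard needed
--     if address in STABLECOIN_ADDRESSES:
--         return True
--     # first truthy of (symbol, token) is the symbol to check
--     for cand in (symbol, token):
--         if cand:
--             u = cand.upper().strip()
--             # scan the input's own prefixes, longest first (no symbol is longer
--             # than 4 chars); a set lookup per prefix subsumes both the exact
--             # match and the startswith tests of the original
--             return any(u[:n] in STABLECOIN_SYMBOLS
--                        for n in range(min(len(u), 4), 0, -1))
--     return False
-- ===== Notes on version B (the rewrite author's own statement) =====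
-- stated objective: idiomatic
-- what changed: Drops the address truthiness guard (the empty string is never in the address set), selects the candidate symbol by looping over (symbol, token) instead of `or`, and replaces the exact-match test plus the startswith loop over the 28-symbol set by a single descending scan over the input's own prefixes (at most 4, the max symbol length) doing set-membership lookups.
import Mathlib
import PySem

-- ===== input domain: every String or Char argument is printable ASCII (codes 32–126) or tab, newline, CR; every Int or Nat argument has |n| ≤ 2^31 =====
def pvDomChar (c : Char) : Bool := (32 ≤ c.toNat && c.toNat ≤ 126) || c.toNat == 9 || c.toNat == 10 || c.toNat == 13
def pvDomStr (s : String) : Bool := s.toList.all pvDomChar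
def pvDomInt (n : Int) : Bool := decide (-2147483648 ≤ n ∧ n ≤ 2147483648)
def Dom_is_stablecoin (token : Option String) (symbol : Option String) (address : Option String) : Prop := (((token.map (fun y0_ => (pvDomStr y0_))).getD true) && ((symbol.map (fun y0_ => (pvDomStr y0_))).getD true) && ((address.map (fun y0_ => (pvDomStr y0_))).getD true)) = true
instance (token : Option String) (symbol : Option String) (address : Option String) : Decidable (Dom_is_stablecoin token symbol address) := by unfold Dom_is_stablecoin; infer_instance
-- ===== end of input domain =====

-- B drops the (redundant) address truthiness guard, picks the candidate symbol by a
-- loop over (symbol, token), and replaces A's exact-match test plus startswith loop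
-- over the symbol set by a descending scan over at most 4 of the input's own
-- prefixes with set-membership lookups (objective: idiomatic).

-- ===== PORT A =====
def pvStableAddrs : List String := PySem.Set.ofList [
  "Es9vMFrzaCERmJfrF4H2FYD4KCoNkY11McCe8BenwNYB",
  "EPjFWdd5AufqSSqeM2qN1xzybapC8G4wEGGkZwyTDt1v",
  "EjmyN6qEC1Tf1JxiG1ae7UTJhUxSwk1TCWNWqxWV4J6o",
  "AJ1W9A9N9dEMdVyoDiam2rV44gnBm2csrPDP7xqcapgX",
  "7kbnvuGBxxj8AG9qp8Scn56muWGaRaFqxg1FsRp3PaFT",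
  "BXXkv6z8ykpG1yuvUDPgh732wzVHB69RnB9YgSYh3itW",
  "Ea5SjE2Y6yvCeW5dYTn7PYMuW5ikXkvbGdcmSnXeaLjS"]

def pvStableSyms : List String := PySem.Set.ofList [
  "USDT", "USDC", "DAI", "BUSD", "USDD", "TUSD", "FRAX",
  "USDP", "GUSD", "PAX", "UST", "LUSD", "SUSD", "CUSD",
  "UXD", "USDB", "DOLA", "USDR", "USDX", "USDS", "USD1",
  "USDJ", "USDK", "USDQ", "MIM", "FEI", "USDH", "CASH"]

-- `symbol or token` (falsy = None or "")
def pvOrStr (a b : Option String) : Option String :=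
  match a with
  | some s => if s = "" then b else some s
  | none => b

def is_stablecoin (token : Option String) (symbol : Option String) (address : Option String) : Bool :=
  -- if address and address in STABLECOIN_ADDRESSES: return True
  if (match address with
      | some a => decide (a ≠ "") && pvStableAddrs.contains a
      | none => false) then true
  else
    -- check_symbol = symbol or token; if check_symbol: ...
    match pvOrStr symbol token with
    | some cs =>
      if cs ≠ "" then
        let check_upper := PySem.Str.strip (PySem.Str.upper cs)
        if pvStableSyms.contains check_upper then true
        else if pvStableSyms.any (fun sc => PySem.Str.startswith check_upper sc) then true
        else false
      else false
    | none => false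

-- ===== PORT B =====
-- for cand in (symbol, token): if cand: return any(u[:n] in SYMS for n in range(min(len(u),4),0,-1))
def pvSymLoop : List (Option String) → Bool
  | [] => false
  | cand :: rest =>
    match cand with
    | some s =>
      if s ≠ "" then
        let u := PySem.Str.strip (PySem.Str.upper s)
        (PySem.List.pyRange (min (PySem.Str.len u) 4) 0 (-1)).any
          (fun n => pvStableSyms.contains (PySem.Str.slice u none (some n)))
      else pvSymLoop rest
    | none => pvSymLoop rest

def is_stablecoin_alt (token : Option String) (symbol : Option String) (address : Option String) : Bool :=
  -- if address in STABLECOIN_ADDRESSES: return True  (None is not in a set of strings)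
  if (match address with
      | some a => pvStableAddrs.contains a
      | none => false) then true
  else pvSymLoop [symbol, token]

-- ===== PRECONDITION & SPEC =====
def Spec_is_stablecoin (token : Option String) (symbol : Option String) (address : Option String) (out : Bool) : Prop := out = is_stablecoin_alt token symbol address
instance (token : Option String) (symbol : Option String) (address : Option String) (out : Bool) : Decidable (Spec_is_stablecoin token symbol address out) := by unfold Spec_is_stablecoin; infer_instance

-- ===== CLAIM (what is proved, stated in full; the proofs are below) =====
def Claim_equal_is_stablecoin : Prop := ∀ (token : Option String) (symbol : Option String) (address : Option String), Dom_is_stablecoin token symbol address → Spec_is_stablecoin token symbol address (is_stablecoin token symbol address)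

-- ===== LEMMAS AND PROOFS =====

-- every symbol in the constant set is a nonempty string
theorem pvSyms_nonempty : ∀ sc ∈ pvStableSyms, sc.toList ≠ [] := by decide

-- every symbol has length at most 4
set_option maxRecDepth 8192 in
theorem pvSyms_len_le : ∀ sc ∈ pvStableSyms, (sc.toList.length : Int) ≤ 4 := by decide

-- the empty string is not a stablecoin address, so A's truthiness guard is redundant
theorem pvAddr_guard (a : String) :
    (decide (a ≠ "") && pvStableAddrs.contains a) = pvStableAddrs.contains a := by
  by_cases h : a = ""
  · subst h; decide
  · simp [h]

-- the core: A's  exact-match ∨ startswith-over-the-set  equals B's descending prefix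
-- scan, for any set S of nonempty strings of length ≤ L and any string u
theorem pv_core (S : List String) (L : Int) (hS : ∀ sc ∈ S, sc.toList ≠ [])
    (hL : ∀ sc ∈ S, (sc.toList.length : Int) ≤ L) (u : String) :
    (if S.contains u then true
     else if S.any (fun sc => PySem.Str.startswith u sc) then true
     else false)
    = (PySem.List.pyRange (min (PySem.Str.len u) L) 0 (-1)).any
        (fun n => S.contains (PySem.Str.slice u none (some n))) := by
  have hchain : ∀ a b : Bool, (if a then true else if b then true else false) = (a || b) := by
    decide
  rw [hchain, Bool.eq_iff_iff]
  simp only [Bool.or_eq_true, List.contains_eq_mem, decide_eq_true_eq, List.any_eq_true,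
    PySem.Str.startswith_eq, PySem.Chars.startswith_iff, PySem.List.mem_pyRange_neg_one,
    PySem.Str.len_eq]
  constructor
  · rintro (hu | ⟨sc, hsc, hpre⟩)
    · -- exact match: the full-length prefix of u is u itself
      refine ⟨(u.toList.length : Int), ⟨by
        have := hS u hu
        have : u.toList.length ≠ 0 := by simpa [List.length_eq_zero_iff] using this
        omega, by
        have := hL u hu
        omega⟩, ?_⟩
      have : PySem.Str.slice u none (some (u.toList.length : Int)) = u := by
        apply String.toList_inj.mp
        rw [PySem.Str.toList_slice]
        simp [PySem.List.slice_to_natCast]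
      rwa [this]
    · -- a startswith hit: take the prefix of that symbol's length
      refine ⟨(sc.toList.length : Int), ⟨by
        have := hS sc hsc
        have : sc.toList.length ≠ 0 := by simpa [List.length_eq_zero_iff] using this
        omega, by
        have h1 := hpre.length_le
        have h2 := hL sc hsc
        omega⟩, ?_⟩
      have : PySem.Str.slice u none (some (sc.toList.length : Int)) = sc := by
        apply String.toList_inj.mp
        rw [PySem.Str.toList_slice]
        simp [PySem.List.slice_to_natCast]
        exact (List.prefix_iff_eq_take.mp hpre).symm
      rwa [this]
  · -- a prefix of u in S is a symbol u starts with
    rintro ⟨i, ⟨h1, h2⟩, hmem⟩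
    right
    refine ⟨_, hmem, ?_⟩
    rw [PySem.Str.toList_slice, PySem.Chars.slice_eq_listSlice,
      PySem.List.slice_to u.toList (by omega)]
    exact List.take_prefix _ _

theorem pv_main (token symbol address : Option String) :
    is_stablecoin token symbol address = is_stablecoin_alt token symbol address := by
  unfold is_stablecoin is_stablecoin_alt
  have haddr : (match address with
      | some a => decide (a ≠ "") && pvStableAddrs.contains a
      | none => false)
      = (match address with
      | some a => pvStableAddrs.contains a
      | none => false) := by
    cases address with
    | none => rfl
    | some a => exact pvAddr_guard a
  rw [haddr]
  cases hb : (match address with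
      | some a => pvStableAddrs.contains a
      | none => false)
  · rw [if_neg (by simp), if_neg (by simp)]
    have hcase : ∀ cs : String,
        (if pvStableSyms.contains (PySem.Str.strip (PySem.Str.upper cs)) then true
         else if pvStableSyms.any (fun sc =>
           PySem.Str.startswith (PySem.Str.strip (PySem.Str.upper cs)) sc) then true
         else false)
        = (PySem.List.pyRange
            (min (PySem.Str.len (PySem.Str.strip (PySem.Str.upper cs))) 4) 0 (-1)).any
            (fun n => pvStableSyms.contains
              (PySem.Str.slice (PySem.Str.strip (PySem.Str.upper cs)) none (some n))) :=
      fun cs => pv_core pvStableSyms 4 pvSyms_nonempty pvSyms_len_le _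
    have hone : ∀ t : String,
        (if t ≠ "" then
          (if pvStableSyms.contains (PySem.Str.strip (PySem.Str.upper t)) then true
           else if pvStableSyms.any (fun sc =>
             PySem.Str.startswith (PySem.Str.strip (PySem.Str.upper t)) sc) then true
           else false)
         else false)
        = (if t ≠ "" then
            (PySem.List.pyRange
              (min (PySem.Str.len (PySem.Str.strip (PySem.Str.upper t))) 4) 0 (-1)).any
              (fun n => pvStableSyms.contains
                (PySem.Str.slice (PySem.Str.strip (PySem.Str.upper t)) none (some n)))
           else false) := by
      intro t
      by_cases h : t = ""
      · rw [if_neg (by simp [h]), if_neg (by simp [h])]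
      · rw [if_pos h, if_pos h]; exact hcase t
    cases symbol with
    | none =>
      cases token with
      | none => rfl
      | some t =>
        simp only [pvOrStr, pvSymLoop]
        exact hone t
    | some s =>
      by_cases hs : s = ""
      · subst hs
        simp only [pvOrStr, pvSymLoop, reduceIte]
        cases token with
        | none => rfl
        | some t =>
          exact hone t
      · simp only [pvOrStr, pvSymLoop, if_neg hs]
        rw [if_pos hs, if_pos hs]
        exact hcase s
  · rw [if_pos (by simp), if_pos (by simp)]

-- ===== VERDICT (by name: the statement is the Claim_ definition above) =====
theorem is_stablecoin_spec : Claim_equal_is_stablecoin := by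
  intro token symbol address _
  exact pv_main token symbol address
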